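-- pv_equiv track=rewrite | github.com/csizmadiaviki/algoritmusok | batman2.py | megold_egy_teszt
-- ===== SOURCE A (Python) =====
-- def megold_egy_teszt(szobak):
--     n = len(szobak)
--
--     dp = []
--     for ind in range(n + 1):
--         masodik_dim = []
--         for ut_inc in range(n + 1):
--             harmadik_dim = [-1] * (n + 1)
--             masodik_dim.append(harmadik_dim)
--         dp.append(masodik_dim)
--
--     def dp_fuggveny(ind, ut_inc, ut_csokk):
--         if ind == n:
--             return 0
--
--         i_inc = ut_inc + 1
--         i_csokk = ut_csokk + 1
--
--         if dp[ind][i_inc][i_csokk] != -1: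
--             return dp[ind][i_inc][i_csokk]
--
--         aktualis = szobak[ind]
--
--         legjobb = dp_fuggveny(ind + 1, ut_inc, ut_csokk)
--
--         if ut_inc == -1 or aktualis > szobak[ut_inc]:
--             kandidat = 1 + dp_fuggveny(ind + 1, ind, ut_csokk)
--             if kandidat > legjobb:
--                 legjobb = kandidat
--
--         if ut_csokk == -1 or aktualis < szobak[ut_csokk]:
--             kandidat = 1 + dp_fuggveny(ind + 1, ut_inc, ind)
--             if kandidat > legjobb:
--                 legjobb = kandidat
--
--         dp[ind][i_inc][i_csokk] = legjobb
--         return legjobb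
--
--     return dp_fuggveny(0, -1, -1)
-- ===== SOURCE B (Python) =====
-- def megold_egy_teszt(szobak):
--     n = len(szobak)
--     # bottom-up DP, rolling layer indexed by (last_inc, last_dec), -1 = none yet
--     prev = {(ui, uc): 0 for ui in range(-1, n) for uc in range(-1, n)}
--     for ind in range(n - 1, -1, -1):
--         a = szobak[ind]
--         cur = {}
--         for ui in range(-1, n):
--             for uc in range(-1, n):
--                 best = prev[(ui, uc)]
--                 if ui == -1 or a > szobak[ui]:
--                     best = max(best, 1 + prev[(ind, uc)])
--                 if uc == -1 or a < szobak[uc]: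
--                     best = max(best, 1 + prev[(ui, ind)])
--                 cur[(ui, uc)] = best
--         prev = cur
--     return prev[(-1, -1)]
-- ===== Notes on version B (the rewrite author's own statement) =====
-- stated objective: alternative
-- what changed: Replaces A's memoized top-down recursion over (ind, last_inc, last_dec) with an iterative bottom-up DP that sweeps ind from n-1 to 0, keeping only a rolling layer keyed by (last_inc, last_dec).
import Mathlib
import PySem

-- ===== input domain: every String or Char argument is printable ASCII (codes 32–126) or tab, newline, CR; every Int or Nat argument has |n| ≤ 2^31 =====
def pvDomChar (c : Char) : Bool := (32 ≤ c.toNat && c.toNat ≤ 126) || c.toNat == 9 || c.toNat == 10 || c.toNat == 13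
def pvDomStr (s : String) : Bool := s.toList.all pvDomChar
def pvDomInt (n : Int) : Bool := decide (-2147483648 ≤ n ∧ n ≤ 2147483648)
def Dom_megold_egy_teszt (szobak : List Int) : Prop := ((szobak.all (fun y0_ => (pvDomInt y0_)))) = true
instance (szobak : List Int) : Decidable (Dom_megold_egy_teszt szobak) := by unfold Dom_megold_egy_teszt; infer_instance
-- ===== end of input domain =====

-- B replaces A's memoized top-down recursion by a bottom-up layer-by-layer DP with a rolling table
-- (objective: alternative decomposition, same asymptotic cost; equivalence of return values proved).

-- ===== PORT A =====
-- A's 3D memo list dp[ind][ut_inc+1][ut_csokk+1] is modeled as a total function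
-- Nat → Nat → Nat → Int initialized to -1 and updated pointwise; this is exact because every
-- read/write of the Python list uses indices 0 ≤ ind ≤ n, 0 ≤ ut_inc+1 ≤ n, 0 ≤ ut_csokk+1 ≤ n.
-- szobak[i] on an in-range nonnegative index is PySem.List.pyGetD (exact there).
-- fuel = n+1 bounds the recursion depth exactly (ind grows by 1 per level and stops at n),
-- so the fuel-0 branch is never reached from megold_egy_teszt.
def pvUpd (m : Nat → Nat → Nat → Int) (i j k : Nat) (v : Int) : Nat → Nat → Nat → Int :=
  fun a b c => if a = i ∧ b = j ∧ c = k then v else m a b c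

def pvARec (sz : List Int) (n : Nat) :
    Nat → Nat → Int → Int → (Nat → Nat → Nat → Int) → Int × (Nat → Nat → Nat → Int)
  | 0, _, _, _, m => (0, m)
  | fuel + 1, ind, ut_inc, ut_csokk, m =>
    if ind = n then (0, m)
    else
      let i_inc := (ut_inc + 1).toNat
      let i_csokk := (ut_csokk + 1).toNat
      if m ind i_inc i_csokk ≠ -1 then (m ind i_inc i_csokk, m)
      else
        let aktualis := PySem.List.pyGetD sz (ind : Int) 0
        let r1 := pvARec sz n fuel (ind + 1) ut_inc ut_csokk m
        let r2 :=
          if ut_inc = -1 ∨ aktualis > PySem.List.pyGetD sz ut_inc 0 then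
            let c := pvARec sz n fuel (ind + 1) (ind : Int) ut_csokk r1.2
            (if 1 + c.1 > r1.1 then 1 + c.1 else r1.1, c.2)
          else r1
        let r3 :=
          if ut_csokk = -1 ∨ aktualis < PySem.List.pyGetD sz ut_csokk 0 then
            let c := pvARec sz n fuel (ind + 1) ut_inc (ind : Int) r2.2
            (if 1 + c.1 > r2.1 then 1 + c.1 else r2.1, c.2)
          else r2
        (r3.1, pvUpd r3.2 ind i_inc i_csokk r3.1)

def megold_egy_teszt (szobak : List Int) : Int :=
  (pvARec szobak szobak.length (szobak.length + 1) 0 (-1) (-1) (fun _ _ _ => -1)).1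

-- ===== PORT B =====
-- B's rolling dict layer {(ui,uc): value} is modeled as a total function Int → Int → Int;
-- exact because Source B only looks up keys (ui,uc) that were inserted (ui,uc ∈ {-1,…,n-1}).
def pvBStep (sz : List Int) (a ind : Int) (prev : Int → Int → Int) : Int → Int → Int :=
  fun ui uc =>
    let best := prev ui uc
    let best := if ui = -1 ∨ a > PySem.List.pyGetD sz ui 0 then max best (1 + prev ind uc) else best
    if uc = -1 ∨ a < PySem.List.pyGetD sz uc 0 then max best (1 + prev ui ind) else best

-- pvBLayers sz k = the dict `prev` after processing ind = n-1 down to n-k.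
def pvBLayers (sz : List Int) : Nat → (Int → Int → Int)
  | 0 => fun _ _ => 0
  | k + 1 =>
    pvBStep sz (PySem.List.pyGetD sz ((sz.length - (k + 1) : Nat) : Int) 0)
      ((sz.length - (k + 1) : Nat) : Int) (pvBLayers sz k)

def megold_egy_teszt_alt (szobak : List Int) : Int :=
  pvBLayers szobak szobak.length (-1) (-1)

-- ===== PRECONDITION & SPEC =====
def Spec_megold_egy_teszt (szobak : List Int) (out : Int) : Prop := out = megold_egy_teszt_alt szobak
instance (szobak : List Int) (out : Int) : Decidable (Spec_megold_egy_teszt szobak out) := by unfold Spec_megold_egy_teszt; infer_instance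

-- ===== CLAIM (what is proved, stated in full; the proofs are below) =====
def Claim_equal_megold_egy_teszt : Prop := ∀ (szobak : List Int), Dom_megold_egy_teszt szobak → Spec_megold_egy_teszt szobak (megold_egy_teszt szobak)

-- ===== LEMMAS AND PROOFS =====

-- memo invariant: every non-(-1) entry at a valid key stores the value of the pure DP.
def pvInv (sz : List Int) (m : Nat → Nat → Nat → Int) : Prop :=
  ∀ (ind : Nat) (ui uc : Int), ind ≤ sz.length →
    -1 ≤ ui → ui < (sz.length : Int) → -1 ≤ uc → uc < (sz.length : Int) →
    m ind (ui + 1).toNat (uc + 1).toNat = -1 ∨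
    m ind (ui + 1).toNat (uc + 1).toNat = pvBLayers sz (sz.length - ind) ui uc


-- updating the memo at a valid key with the correct DP value preserves the invariant
lemma pvInv_upd (sz : List Int) (m : Nat → Nat → Nat → Int) (ind : Nat) (ui uc : Int) (v : Int)
    (hui1 : -1 ≤ ui) (huc1 : -1 ≤ uc)
    (hInv : pvInv sz m) (hv : v = pvBLayers sz (sz.length - ind) ui uc) :
    pvInv sz (pvUpd m ind (ui + 1).toNat (uc + 1).toNat v) := by
  intro ind' ui' uc' h1 h2 h3 h4 h5
  unfold pvUpd
  by_cases hkey : ind' = ind ∧ (ui' + 1).toNat = (ui + 1).toNat ∧ (uc' + 1).toNat = (uc + 1).toNat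
  · obtain ⟨hk1, hk2, hk3⟩ := hkey
    have hui : ui' = ui := by omega
    have huc : uc' = uc := by omega
    right
    rw [if_pos ⟨hk1, hk2, hk3⟩, hv, hk1, hui, huc]
  · rw [if_neg hkey]
    exact hInv ind' ui' uc' h1 h2 h3 h4 h5

-- packaging: the returned value together with the memo update
lemma pvFinish (sz : List Int) (m : Nat → Nat → Nat → Int) (ind : Nat) (ui uc v : Int)
    (hui1 : -1 ≤ ui) (huc1 : -1 ≤ uc) (hM : pvInv sz m)
    (hv : v = pvBLayers sz (sz.length - ind) ui uc) :
    (v, pvUpd m ind (ui + 1).toNat (uc + 1).toNat v).1 = pvBLayers sz (sz.length - ind) ui uc ∧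
    pvInv sz (v, pvUpd m ind (ui + 1).toNat (uc + 1).toNat v).2 :=
  ⟨hv, pvInv_upd sz m ind ui uc v hui1 huc1 hM hv⟩

lemma pvARec_correct (sz : List Int) :
    ∀ (fuel ind : Nat) (ui uc : Int) (m : Nat → Nat → Nat → Int),
      ind ≤ sz.length → -1 ≤ ui → ui < (sz.length : Int) → -1 ≤ uc → uc < (sz.length : Int) →
      sz.length - ind < fuel → pvInv sz m →
      (pvARec sz sz.length fuel ind ui uc m).1 = pvBLayers sz (sz.length - ind) ui uc ∧
      pvInv sz (pvARec sz sz.length fuel ind ui uc m).2 := by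
  intro fuel
  induction fuel with
  | zero => intro ind ui uc m _ _ _ _ _ hf _; omega
  | succ k ih =>
    intro ind ui uc m hind hui1 hui2 huc1 huc2 hf hInv
    by_cases hin : ind = sz.length
    · constructor
      · simp [pvARec, hin, pvBLayers]
      · simpa [pvARec, hin] using hInv
    · have hlt : ind < sz.length := lt_of_le_of_ne hind hin
      have hk2 : sz.length - ind = (sz.length - (ind + 1)) + 1 := by omega
      have hidx : sz.length - (sz.length - (ind + 1) + 1) = ind := by omega
      have hR : ∀ x y : Int, pvBLayers sz (sz.length - ind) x y =
          pvBStep sz (PySem.List.pyGetD sz (ind : Int) 0) (ind : Int)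
            (pvBLayers sz (sz.length - (ind + 1))) x y := by
        intro x y; rw [hk2]; simp only [pvBLayers]; rw [hidx]
      simp only [pvARec, if_neg hin]
      by_cases hm : m ind (ui + 1).toNat (uc + 1).toNat = -1
      · -- memo miss: recompute, matching B's step
        rw [if_neg (by simp [hm])]
        obtain ⟨hv1, hi1⟩ := ih (ind + 1) ui uc m (by omega) hui1 hui2 huc1 huc2 (by omega) hInv
        by_cases hc1 : ui = -1 ∨ PySem.List.pyGetD sz (ind : Int) 0 > PySem.List.pyGetD sz ui 0
        · rw [if_pos hc1]
          obtain ⟨hv2, hi2⟩ := ih (ind + 1) (ind : Int) uc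
            ((pvARec sz sz.length k (ind + 1) ui uc m).2) (by omega) (by omega) (by exact_mod_cast hlt)
            huc1 huc2 (by omega) hi1
          by_cases hc2 : uc = -1 ∨ PySem.List.pyGetD sz (ind : Int) 0 < PySem.List.pyGetD sz uc 0
          · rw [if_pos hc2]
            obtain ⟨hv3, hi3⟩ := ih (ind + 1) ui (ind : Int) _ (by omega) hui1 hui2 (by omega)
              (by exact_mod_cast hlt) (by omega) hi2
            refine pvFinish sz _ ind ui uc _ hui1 huc1 hi3 ?_
            rw [hv3, hv2, hv1, hR ui uc]
            simp only [pvBStep]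
            rw [if_pos hc1, if_pos hc2, max_def, max_def]
            split_ifs <;> omega
          · rw [if_neg hc2]
            refine pvFinish sz _ ind ui uc _ hui1 huc1 hi2 ?_
            rw [hv2, hv1, hR ui uc]
            simp only [pvBStep]
            rw [if_pos hc1, if_neg hc2, max_def]
            split_ifs <;> omega
        · rw [if_neg hc1]
          by_cases hc2 : uc = -1 ∨ PySem.List.pyGetD sz (ind : Int) 0 < PySem.List.pyGetD sz uc 0
          · rw [if_pos hc2]
            obtain ⟨hv3, hi3⟩ := ih (ind + 1) ui (ind : Int)
              ((pvARec sz sz.length k (ind + 1) ui uc m).2) (by omega) hui1 hui2 (by omega)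
              (by exact_mod_cast hlt) (by omega) hi1
            refine pvFinish sz _ ind ui uc _ hui1 huc1 hi3 ?_
            rw [hv3, hv1, hR ui uc]
            simp only [pvBStep]
            rw [if_neg hc1, if_pos hc2, max_def]
            split_ifs <;> omega
          · rw [if_neg hc2]
            refine pvFinish sz _ ind ui uc _ hui1 huc1 hi1 ?_
            rw [hv1, hR ui uc]
            simp only [pvBStep]
            rw [if_neg hc1, if_neg hc2]
      · -- memo hit
        rw [if_pos hm]
        rcases hInv ind ui uc hind hui1 hui2 huc1 huc2 with h | h
        · exact absurd h hm
        · exact ⟨h, hInv⟩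

theorem pv_main (sz : List Int) : megold_egy_teszt sz = megold_egy_teszt_alt sz := by
  have h := pvARec_correct sz (sz.length + 1) 0 (-1) (-1) (fun _ _ _ => -1)
    (by omega) (by omega) (by omega) (by omega) (by omega) (by omega)
    (fun _ _ _ _ _ _ _ _ => Or.inl rfl)
  unfold megold_egy_teszt megold_egy_teszt_alt
  rw [h.1]
  norm_num

-- ===== VERDICT (by name: the statement is the Claim_ definition above) =====
theorem megold_egy_teszt_spec : Claim_equal_megold_egy_teszt := by
  intro sz _
  exact pv_main sz
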